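-- pv_equiv track=rewrite | github.com/miliar/Code_Jam_Webscraper | Solutions_python/Problem_181/1254.py | solve
-- ===== SOURCE A (Python) =====
-- def solve(S):
--   last_word = ''
--   leftmost_char = ''
--   for c in S:
--     if last_word == '':
--       last_word = c
--       leftmost_char = c
--     else:
--       if c >= leftmost_char:
--         last_word = c + last_word
--         leftmost_char = c
--       else:
--         last_word = last_word + c
--   return last_word
-- ===== SOURCE B (Python) =====
-- def solve(S):
--     n = len(S)
--     pmax = []
--     for c in S:
--         pmax.append(c if not pmax or c > pmax[-1] else pmax[-1])
--     records = [i for i in range(n) if i == 0 or S[i] >= pmax[i - 1]]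
--     rec_set = set(records)
--     front = ''.join(S[i] for i in reversed(records))
--     back = ''.join(S[i] for i in range(n) if i not in rec_set)
--     return front + back
-- ===== Notes on version B (the rewrite author's own statement) =====
-- stated objective: faster
-- what changed: B replaces A's stateful word building (prepend/append to a growing string while tracking the leftmost char) with a staged index computation: a prefix-maxima array, then a comprehension selecting the indices i with S[i] >= max(S[:i]), then assembly as those chars reversed followed by the remaining chars in order; this avoids A's repeated O(n) string prepends.
import Mathlib
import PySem

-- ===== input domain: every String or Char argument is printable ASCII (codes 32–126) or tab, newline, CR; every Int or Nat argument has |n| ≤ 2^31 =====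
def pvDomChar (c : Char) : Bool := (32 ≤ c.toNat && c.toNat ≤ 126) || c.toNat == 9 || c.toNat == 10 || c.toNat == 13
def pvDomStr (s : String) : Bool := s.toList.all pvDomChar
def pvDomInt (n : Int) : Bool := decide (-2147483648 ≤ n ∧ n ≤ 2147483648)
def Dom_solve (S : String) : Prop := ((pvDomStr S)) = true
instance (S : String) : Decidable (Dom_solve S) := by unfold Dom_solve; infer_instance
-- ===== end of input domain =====

-- B replaces A's stateful word building with a staged index computation (prefix-maxima array,
-- then the indices with S[i] >= max(S[:i]), then those chars reversed + the rest); measured faster on large inputs.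

-- ===== PORT A =====
-- A's loop: state (last_word, leftmost_char), both Python strings = List Char;
-- 'c >= leftmost_char' is Python string comparison = lexicographic ≤ on List Char.
def solveLoopA : List Char → List Char → List Char → List Char
  | [], lastWord, _ => lastWord
  | c :: rest, lastWord, leftmost =>
    if lastWord = [] then
      solveLoopA rest [c] [c]
    else
      if leftmost ≤ [c] then
        solveLoopA rest (c :: lastWord) [c]
      else
        solveLoopA rest (lastWord ++ [c]) leftmost

def solve (S : String) : String :=
  String.mk (solveLoopA S.toList [] [])

-- ===== PORT B =====
-- 'pmax.append(c if not pmax or c > pmax[-1] else pmax[-1])'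
def pmaxStep (pm : List Char) (c : Char) : List Char :=
  pm ++ [match pm.getLast? with
         | none => c
         | some m => if m < c then c else m]

-- the 'for c in S' pass building pmax
def pmaxLoop : List Char → List Char → List Char
  | [], pm => pm
  | c :: rest, pm => pmaxLoop rest (pmaxStep pm c)

-- 'i == 0 or S[i] >= pmax[i - 1]'
def isRec (cs pm : List Char) (i : Nat) : Bool :=
  i == 0 || decide (pm.getD (i - 1) ' ' ≤ cs.getD i ' ')

-- 'records = [i for i in range(n) if ...]'
def recordsB (cs : List Char) : List Nat :=
  (List.range cs.length).filter (isRec cs (pmaxLoop cs []))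

-- front = records reversed, back = the other indices in order; result = front ++ back
def solveB (cs : List Char) : List Char :=
  (recordsB cs).reverse.map (fun i => cs.getD i ' ')
    ++ ((List.range cs.length).filter (fun i => !((recordsB cs).contains i))).map
         (fun i => cs.getD i ' ')

def solve_alt (S : String) : String :=
  String.mk (solveB S.toList)

-- ===== PRECONDITION & SPEC =====
def Spec_solve (S : String) (out : String) : Prop := out = solve_alt S
instance (S : String) (out : String) : Decidable (Spec_solve S out) := by unfold Spec_solve; infer_instance

-- ===== CLAIM (what is proved, stated in full; the proofs are below) =====
def Claim_equal_solve : Prop := ∀ (S : String), Dom_solve S → Spec_solve S (solve S)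

-- ===== LEMMAS AND PROOFS =====

theorem singleton_le_singleton (a b : Char) : ([a] ≤ [b]) ↔ a ≤ b := by
  constructor
  · intro h
    by_contra hba
    have hb : b < a := lt_of_not_ge hba
    exact absurd (List.Lex.rel hb) (by simpa [List.instLE, List.lt_iff_lex_lt] using h)
  · intro h
    rcases lt_or_eq_of_le h with h | h
    · exact le_of_lt (by simpa [List.lt_iff_lex_lt] using List.Lex.rel (r := (· < ·)) h)
    · simp [h]

-- A-side: peeling the last character off the input.
-- pyMaxChar p = Python's max(p) on a nonempty p (the running maximum A keeps as leftmost_char).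
def pyMaxChar : List Char → Char
  | [] => ' '
  | d :: ds => ds.foldl max d

theorem loopA_snoc (xs : List Char) : ∀ (c : Char) (w : List Char) (m : Char), w ≠ [] →
    solveLoopA (xs ++ [c]) w [m]
      = (if xs.foldl max m ≤ c then c :: solveLoopA xs w [m]
         else solveLoopA xs w [m] ++ [c]) := by
  induction xs with
  | nil =>
    intro c w m hw
    by_cases h : m ≤ c
    · simp [solveLoopA, hw, (singleton_le_singleton m c).mpr h, h]
    · have h' : ¬ ([m] ≤ [c]) := fun hc => h ((singleton_le_singleton m c).mp hc)
      simp [solveLoopA, hw, h', h]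
  | cons x xs ih =>
    intro c w m hw
    by_cases h : m ≤ x
    · have h' : [m] ≤ [x] := (singleton_le_singleton m x).mpr h
      have hmx : max m x = x := max_eq_right h
      have := ih c (x :: w) x (by simp)
      simp only [List.cons_append, solveLoopA, if_neg hw, if_pos h']
      simpa [List.foldl, hmx] using this
    · have h' : ¬ ([m] ≤ [x]) := fun hc => h ((singleton_le_singleton m x).mp hc)
      have hmx : max m x = m := max_eq_left (le_of_lt (lt_of_not_ge h))
      have := ih c (w ++ [x]) m (by simp)
      simp only [List.cons_append, solveLoopA, if_neg hw, if_neg h']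
      simpa [List.foldl, hmx] using this

def fA (cs : List Char) : List Char := solveLoopA cs [] []

theorem fA_snoc (p : List Char) (c : Char) (hp : p ≠ []) :
    fA (p ++ [c]) = if pyMaxChar p ≤ c then c :: fA p else fA p ++ [c] := by
  obtain ⟨d, p', rfl⟩ := List.exists_cons_of_ne_nil hp
  show solveLoopA (d :: (p' ++ [c])) [] [] = _
  simp only [solveLoopA]
  have := loopA_snoc p' c [d] d (by simp)
  simpa [fA, solveLoopA, pyMaxChar] using this

-- B-side helper facts ------------------------------------------------------

theorem pyMaxChar_snoc (p : List Char) (c : Char) (hp : p ≠ []) :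
    pyMaxChar (p ++ [c]) = if pyMaxChar p < c then c else pyMaxChar p := by
  obtain ⟨d, p', rfl⟩ := List.exists_cons_of_ne_nil hp
  show pyMaxChar (d :: (p' ++ [c])) = _
  simp only [pyMaxChar]
  rw [List.foldl_append]
  rcases lt_trichotomy (List.foldl max d p') c with h | h | h
  · simp [List.foldl, max_eq_right (le_of_lt h), h]
  · simp [List.foldl, h]
  · simp [List.foldl, max_eq_left (le_of_lt h), not_lt_of_gt h]

theorem pmaxLoop_snoc (xs : List Char) : ∀ (c : Char) (pm : List Char),
    pmaxLoop (xs ++ [c]) pm = pmaxStep (pmaxLoop xs pm) c := by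
  induction xs with
  | nil => intro c pm; rfl
  | cons x xs ih => intro c pm; exact ih c (pmaxStep pm x)

theorem pmaxLoop_length (xs : List Char) : ∀ (pm : List Char),
    (pmaxLoop xs pm).length = pm.length + xs.length := by
  induction xs with
  | nil => intro pm; simp [pmaxLoop]
  | cons x xs ih =>
    intro pm
    show (pmaxLoop xs (pmaxStep pm x)).length = _
    rw [ih (pmaxStep pm x)]
    simp [pmaxStep]
    omega

theorem pmax_getLast (p : List Char) (hp : p ≠ []) :
    (pmaxLoop p []).getLast? = some (pyMaxChar p) := by
  induction p using List.reverseRecOn with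
  | nil => exact absurd rfl hp
  | append_singleton q c ih =>
    rw [pmaxLoop_snoc]
    by_cases hq : q = []
    · subst hq; simp [pmaxLoop, pmaxStep, pyMaxChar]
    · rw [pmaxStep, ih hq, pyMaxChar_snoc q c hq, List.getLast?_concat]

theorem pmax_getD (p : List Char) : ∀ i, i < p.length →
    (pmaxLoop p []).getD i ' ' = pyMaxChar (p.take (i + 1)) := by
  induction p using List.reverseRecOn with
  | nil => intro i hi; simp at hi
  | append_singleton q c ih =>
    intro i hi
    rw [pmaxLoop_snoc, pmaxStep]
    have hql : (pmaxLoop q []).length = q.length := by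
      simpa using pmaxLoop_length q []
    by_cases hlt : i < q.length
    · rw [List.getD_append _ _ ' ' i (by omega),
          List.take_append_of_le_length (by omega), ih i hlt]
    · have hieq : i = q.length := by simp at hi; omega
      subst hieq
      rw [List.getD_append_right _ _ ' ' _ (by omega)]
      by_cases hq : q = []
      · subst hq; simp [pmaxLoop, pyMaxChar]
      · rw [pmax_getLast q hq]
        have ht : List.take (q.length + 1) (q ++ [c]) = q ++ [c] := by
          rw [show q.length + 1 = (q ++ [c]).length by simp, List.take_length]
        rw [ht, pyMaxChar_snoc q c hq, hql]
        simp

-- the record test of B coincides with 'i == 0 or S[i] >= max(S[:i])'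
def isRecSpec (cs : List Char) (i : Nat) : Bool :=
  i == 0 || decide (pyMaxChar (cs.take i) ≤ cs.getD i ' ')

theorem isRec_eq_spec (cs : List Char) (i : Nat) (hi : i < cs.length) :
    isRec cs (pmaxLoop cs []) i = isRecSpec cs i := by
  cases i with
  | zero => rfl
  | succ j =>
    unfold isRec isRecSpec
    have : j < cs.length := by omega
    rw [show j + 1 - 1 = j from rfl, pmax_getD cs j this]

theorem recordsB_eq (cs : List Char) :
    recordsB cs = (List.range cs.length).filter (isRecSpec cs) := by
  unfold recordsB
  exact List.filter_congr (fun i hi => isRec_eq_spec cs i (List.mem_range.mp hi))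

theorem isRecSpec_append (p : List Char) (c : Char) (i : Nat) (hi : i < p.length) :
    isRecSpec (p ++ [c]) i = isRecSpec p i := by
  unfold isRecSpec
  rw [List.take_append_of_le_length (le_of_lt hi), List.getD_append p [c] ' ' i hi]

theorem isRecSpec_last (p : List Char) (c : Char) (hp : p ≠ []) :
    isRecSpec (p ++ [c]) p.length = decide (pyMaxChar p ≤ c) := by
  unfold isRecSpec
  have h0 : (p.length == 0) = false := by
    simp [List.length_eq_zero_iff, hp]
  rw [h0, List.take_left, List.getD_append_right p [c] ' ' p.length (le_refl _)]
  simp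

theorem mem_filter_range_lt {q : Nat → Bool} {n i : Nat}
    (h : i ∈ (List.range n).filter q) : i < n := by
  have := List.mem_filter.mp h
  exact List.mem_range.mp this.1

theorem fB_snoc (p : List Char) (c : Char) (hp : p ≠ []) :
    solveB (p ++ [c]) = if pyMaxChar p ≤ c then c :: solveB p else solveB p ++ [c] := by
  have hn : (p ++ [c]).length = p.length + 1 := by simp
  have hrangen : List.range (p.length + 1) = List.range p.length ++ [p.length] := by
    simp [List.range_succ]
  have hfiltpre : (List.range p.length).filter (isRecSpec (p ++ [c]))
      = (List.range p.length).filter (isRecSpec p) :=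
    List.filter_congr (fun i hi => isRecSpec_append p c i (List.mem_range.mp hi))
  have hrs_lt : ∀ i ∈ recordsB p, i < p.length := fun i hi => mem_filter_range_lt hi
  have hgetd : ∀ i, i < p.length → (p ++ [c]).getD i ' ' = p.getD i ' ' :=
    fun i hi => List.getD_append p [c] ' ' i hi
  have hgetlast : (p ++ [c]).getD p.length ' ' = c := by
    rw [List.getD_append_right p [c] ' ' p.length (le_refl _)]; simp
  have hmapeq : ∀ (l : List Nat), (∀ i ∈ l, i < p.length) →
      l.map (fun i => (p ++ [c]).getD i ' ') = l.map (fun i => p.getD i ' ') :=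
    fun l hl => List.map_congr_left (fun i hi => hgetd i (hl i hi))
  have hnotmem : p.length ∉ recordsB p := fun hm => absurd (hrs_lt _ hm) (lt_irrefl _)
  by_cases hc : pyMaxChar p ≤ c
  · -- the new char is a record: the record list gains index p.length at the end
    have hlast : isRecSpec (p ++ [c]) p.length = true := by
      rw [isRecSpec_last p c hp]; simpa using hc
    have hfilt : recordsB (p ++ [c]) = recordsB p ++ [p.length] := by
      rw [recordsB_eq, recordsB_eq, hn, hrangen, List.filter_append, hfiltpre]
      simp [hlast]
    have hcontn : ∀ i ∈ List.range p.length,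
        ((recordsB p ++ [p.length]).contains i) = ((recordsB p).contains i) := by
      intro i hi
      have : i ≠ p.length := Nat.ne_of_lt (List.mem_range.mp hi)
      simp [this]
    have hback : (List.range (p.length + 1)).filter
          (fun i => !((recordsB p ++ [p.length]).contains i))
        = (List.range p.length).filter (fun i => !((recordsB p).contains i)) := by
      rw [hrangen, List.filter_append]
      have h1 : (List.range p.length).filter (fun i => !((recordsB p ++ [p.length]).contains i))
          = (List.range p.length).filter (fun i => !((recordsB p).contains i)) :=
        List.filter_congr (fun i hi => by rw [hcontn i hi])
      have h2 : ([p.length] : List Nat).filter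
          (fun i => !((recordsB p ++ [p.length]).contains i)) = [] := by
        simp
      rw [h1, h2, List.append_nil]
    have hfront : (recordsB p ++ [p.length]).reverse.map (fun i => (p ++ [c]).getD i ' ')
        = c :: (recordsB p).reverse.map (fun i => p.getD i ' ') := by
      rw [List.reverse_append]
      simp only [List.reverse_singleton, List.singleton_append, List.map_cons, hgetlast]
      congr 1
      exact hmapeq _ (fun i hi => hrs_lt i (List.mem_reverse.mp hi))
    unfold solveB
    rw [hfilt, hn, hback, hfront, if_pos hc,
        hmapeq _ (fun i hi => mem_filter_range_lt hi)]
    simp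
  · -- the new char is not a record: it goes to the back
    have hlast : isRecSpec (p ++ [c]) p.length = false := by
      rw [isRecSpec_last p c hp]; simpa using hc
    have hfilt : recordsB (p ++ [c]) = recordsB p := by
      rw [recordsB_eq, recordsB_eq, hn, hrangen, List.filter_append, hfiltpre]
      simp [hlast]
    have hback : (List.range (p.length + 1)).filter (fun i => !((recordsB p).contains i))
        = (List.range p.length).filter (fun i => !((recordsB p).contains i)) ++ [p.length] := by
      rw [hrangen, List.filter_append]
      congr 1
      simp [hnotmem]
    unfold solveB
    rw [hfilt, hn, hback, if_neg hc, List.map_append,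
        hmapeq _ (fun i hi => hrs_lt i (List.mem_reverse.mp hi)),
        hmapeq _ (fun i hi => mem_filter_range_lt hi), List.map_singleton, hgetlast]
    simp

theorem fA_eq_fB (cs : List Char) : fA cs = solveB cs := by
  induction cs using List.reverseRecOn with
  | nil => simp [fA, solveLoopA, solveB, recordsB]
  | append_singleton p c ih =>
    by_cases hp : p = []
    · subst hp
      simp [fA, solveLoopA, solveB, recordsB, isRec, List.range_succ]
    · rw [fA_snoc p c hp, fB_snoc p c hp, ih]

-- ===== VERDICT (by name: the statement is the Claim_ definition above) =====
theorem solve_spec : Claim_equal_solve := by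
  intro S _
  unfold Spec_solve solve solve_alt
  exact congrArg String.mk (fA_eq_fB S.toList)
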